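-- pv_equiv track=rewrite | github.com/hermens16/samsung-tv | remover_duplicados.py | traduzir_grupo
-- ===== SOURCE A (Python) =====
-- import unicodedata
--
-- def normalizar(txt):
--     txt = unicodedata.normalize("NFKD", txt)
--     txt = txt.encode("ASCII", "ignore").decode("ASCII")
--     return txt.upper().strip()
--
-- def traduzir_grupo(grupo_original):
--
--     g = normalizar(grupo_original)
--
--     if "ANIME" in g:
--         return "ANIME & TOKUSATSU"
--
--     if any(x in g for x in ["NEWS", "NOTIC", "ACTUAL"]):
--         return "NOTÍCIAS"
--
--     if any(x in g for x in ["SPORT", "FUTB", "BALL"]):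
--         return "ESPORTES"
--
--     if any(x in g for x in ["KID", "NIÑ"]):
--         return "INFANTIL"
--
--     if any(x in g for x in ["SERIE", "DRAMA", "REALITY"]):
--         return "SÉRIES"
--
--     if any(x in g for x in ["MOVIE", "FILM", "SCI"]):
--         return "FILMES"
--
--     if any(x in g for x in ["DOCU", "NATURE"]):
--         return "DOCUMENTÁRIOS"
--
--     if any(x in g for x in ["MUSIC", "MUSIK"]):
--         return "MÚSICA"
--
--     return "VARIEDADES"
-- ===== SOURCE B (Python) =====
-- import unicodedata
--
-- def normalizar(txt):
--     txt = unicodedata.normalize("NFKD", txt)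
--     txt = txt.encode("ASCII", "ignore").decode("ASCII")
--     return txt.upper().strip()
--
-- # keyword -> (priority, category); lengths of all keywords are 3..7
-- KEYWORDS = {
--     "ANIME": (0, "ANIME & TOKUSATSU"),
--     "NEWS": (1, "NOTÍCIAS"), "NOTIC": (1, "NOTÍCIAS"), "ACTUAL": (1, "NOTÍCIAS"),
--     "SPORT": (2, "ESPORTES"), "FUTB": (2, "ESPORTES"), "BALL": (2, "ESPORTES"),
--     "KID": (3, "INFANTIL"), "NIÑ": (3, "INFANTIL"),
--     "SERIE": (4, "SÉRIES"), "DRAMA": (4, "SÉRIES"), "REALITY": (4, "SÉRIES"),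
--     "MOVIE": (5, "FILMES"), "FILM": (5, "FILMES"), "SCI": (5, "FILMES"),
--     "DOCU": (6, "DOCUMENTÁRIOS"), "NATURE": (6, "DOCUMENTÁRIOS"),
--     "MUSIC": (7, "MÚSICA"), "MUSIK": (7, "MÚSICA"),
-- }
--
-- def traduzir_grupo(grupo_original):
--     # Slide a window over the normalized name and hash-look-up each substring
--     # of length 3..7 in the keyword table, keeping the lowest-priority hit.
--     g = normalizar(grupo_original)
--     best = None
--     for i in range(len(g)):
--         for L in (3, 4, 5, 6, 7):
--             hit = KEYWORDS.get(g[i:i + L])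
--             if hit is not None and (best is None or hit[0] < best[0]):
--                 best = hit
--     return "VARIEDADES" if best is None else best[1]
-- ===== Notes on version B (the rewrite author's own statement) =====
-- stated objective: alternative
-- what changed: Instead of A's eight ordered substring searches ('kw in g' per keyword), B slides a window over the normalized name once, hash-looks up every substring of length 3-7 in a keyword->(priority,category) dict, and keeps the hit with the lowest priority.
import Mathlib
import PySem

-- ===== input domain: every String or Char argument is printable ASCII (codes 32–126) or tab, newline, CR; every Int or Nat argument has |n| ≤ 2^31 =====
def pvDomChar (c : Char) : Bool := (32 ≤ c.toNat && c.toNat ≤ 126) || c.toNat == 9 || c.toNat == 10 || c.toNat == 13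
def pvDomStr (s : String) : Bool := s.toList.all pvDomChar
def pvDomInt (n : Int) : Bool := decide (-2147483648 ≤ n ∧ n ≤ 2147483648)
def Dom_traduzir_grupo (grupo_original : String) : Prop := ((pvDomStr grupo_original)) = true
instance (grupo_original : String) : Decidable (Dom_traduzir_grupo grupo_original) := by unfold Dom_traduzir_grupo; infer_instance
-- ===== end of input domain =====

-- B replaces A's ordered substring searches by a single sliding-window pass with a
-- hash lookup of each length-3..7 window, keeping the lowest-priority hit (alternative).

-- ===== PORT A =====
-- normalizar: NFKD + ASCII-ignore are the identity on the ASCII input domain, so the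
-- port is upper().strip() exactly (exact on Dom's printable-ASCII/tab/newline/CR strings).
def pvNormalizar (txt : String) : String :=
  PySem.Str.strip (PySem.Str.upper txt)

def traduzir_grupo (grupo_original : String) : String :=
  let g := pvNormalizar grupo_original
  if PySem.Str.isIn "ANIME" g then "ANIME & TOKUSATSU"
  else if PySem.Str.isIn "NEWS" g || PySem.Str.isIn "NOTIC" g || PySem.Str.isIn "ACTUAL" g then "NOTÍCIAS"
  else if PySem.Str.isIn "SPORT" g || PySem.Str.isIn "FUTB" g || PySem.Str.isIn "BALL" g then "ESPORTES"
  else if PySem.Str.isIn "KID" g || PySem.Str.isIn "NIÑ" g then "INFANTIL"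
  else if PySem.Str.isIn "SERIE" g || PySem.Str.isIn "DRAMA" g || PySem.Str.isIn "REALITY" g then "SÉRIES"
  else if PySem.Str.isIn "MOVIE" g || PySem.Str.isIn "FILM" g || PySem.Str.isIn "SCI" g then "FILMES"
  else if PySem.Str.isIn "DOCU" g || PySem.Str.isIn "NATURE" g then "DOCUMENTÁRIOS"
  else if PySem.Str.isIn "MUSIC" g || PySem.Str.isIn "MUSIK" g then "MÚSICA"
  else "VARIEDADES"

-- ===== PORT B =====
-- KEYWORDS: keyword -> (priority, category); a Python dict with nodup keys,
-- kept as the association list of its items (keys as char lists).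
def pvKw : List (List Char × (Nat × String)) :=
  [ ("ANIME".toList, (0, "ANIME & TOKUSATSU")),
    ("NEWS".toList, (1, "NOTÍCIAS")),
    ("NOTIC".toList, (1, "NOTÍCIAS")),
    ("ACTUAL".toList, (1, "NOTÍCIAS")),
    ("SPORT".toList, (2, "ESPORTES")),
    ("FUTB".toList, (2, "ESPORTES")),
    ("BALL".toList, (2, "ESPORTES")),
    ("KID".toList, (3, "INFANTIL")),
    ("NIÑ".toList, (3, "INFANTIL")),
    ("SERIE".toList, (4, "SÉRIES")),
    ("DRAMA".toList, (4, "SÉRIES")),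
    ("REALITY".toList, (4, "SÉRIES")),
    ("MOVIE".toList, (5, "FILMES")),
    ("FILM".toList, (5, "FILMES")),
    ("SCI".toList, (5, "FILMES")),
    ("DOCU".toList, (6, "DOCUMENTÁRIOS")),
    ("NATURE".toList, (6, "DOCUMENTÁRIOS")),
    ("MUSIC".toList, (7, "MÚSICA")),
    ("MUSIK".toList, (7, "MÚSICA")) ]

-- KEYWORDS.get(w): first (here: unique) entry whose key is w
def pvLookup (w : List Char) : Option (Nat × String) :=
  (List.find? (fun en => en.1 == w) pvKw).map (fun en => en.2)

-- 'if hit is not None and (best is None or hit[0] < best[0]): best = hit'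
def pvBetter (best : Option (Nat × String)) (hit : Option (Nat × String)) : Option (Nat × String) :=
  match hit with
  | none => best
  | some h =>
    match best with
    | none => some h
    | some b => if h.1 < b.1 then some h else some b

def traduzir_grupo_alt (grupo_original : String) : String :=
  let cs := (pvNormalizar grupo_original).toList
  let best := (List.range cs.length).foldl
    (fun (b : Option (Nat × String)) (i : Nat) => (([3, 4, 5, 6, 7] : List Nat)).foldl
      (fun (b : Option (Nat × String)) (L : Nat) => pvBetter b (pvLookup (PySem.List.slice cs (some (i : Int)) (some ((i : Int) + (L : Int)))))) b) none
  match best with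
  | none => "VARIEDADES"
  | some b => b.2

-- ===== PRECONDITION & SPEC =====
def Spec_traduzir_grupo (grupo_original : String) (out : String) : Prop := out = traduzir_grupo_alt grupo_original
instance (grupo_original : String) (out : String) : Decidable (Spec_traduzir_grupo grupo_original out) := by unfold Spec_traduzir_grupo; infer_instance

-- ===== CLAIM (what is proved, stated in full; the proofs are below) =====
def Claim_equal_traduzir_grupo : Prop := ∀ (grupo_original : String), Dom_traduzir_grupo grupo_original → Spec_traduzir_grupo grupo_original (traduzir_grupo grupo_original)

-- ===== LEMMAS AND PROOFS =====

-- A's if-chain expressed over the normalized character list (bridge target for port A)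
def pvChain (cs : List Char) : String :=
  if PySem.Chars.isIn "ANIME".toList cs then "ANIME & TOKUSATSU"
  else if PySem.Chars.isIn "NEWS".toList cs || PySem.Chars.isIn "NOTIC".toList cs || PySem.Chars.isIn "ACTUAL".toList cs then "NOTÍCIAS"
  else if PySem.Chars.isIn "SPORT".toList cs || PySem.Chars.isIn "FUTB".toList cs || PySem.Chars.isIn "BALL".toList cs then "ESPORTES"
  else if PySem.Chars.isIn "KID".toList cs || PySem.Chars.isIn "NIÑ".toList cs then "INFANTIL"
  else if PySem.Chars.isIn "SERIE".toList cs || PySem.Chars.isIn "DRAMA".toList cs || PySem.Chars.isIn "REALITY".toList cs then "SÉRIES"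
  else if PySem.Chars.isIn "MOVIE".toList cs || PySem.Chars.isIn "FILM".toList cs || PySem.Chars.isIn "SCI".toList cs then "FILMES"
  else if PySem.Chars.isIn "DOCU".toList cs || PySem.Chars.isIn "NATURE".toList cs then "DOCUMENTÁRIOS"
  else if PySem.Chars.isIn "MUSIC".toList cs || PySem.Chars.isIn "MUSIK".toList cs then "MÚSICA"
  else "VARIEDADES"

def pvHit (cs : List Char) (p : Nat × Nat) : Option (Nat × String) :=
  pvLookup (PySem.List.slice cs (some (p.1 : Int)) (some ((p.1 : Int) + (p.2 : Int))))

def pvPairs (n : Nat) : List (Nat × Nat) :=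
  (List.range n).flatMap (fun i => (([3, 4, 5, 6, 7] : List Nat)).map (fun L => (i, L)))

lemma pv_foldl_flatMap {α β γ : Type} (l : List α) (gf : α → List β) (f : γ → β → γ) (a : γ) :
    (l.flatMap gf).foldl f a = l.foldl (fun a x => (gf x).foldl f a) a := by
  induction l generalizing a with
  | nil => rfl
  | cons h t ih => simp [List.foldl_append, ih]

lemma pv_nested_eq (cs : List Char) :
    (List.range cs.length).foldl
      (fun (b : Option (Nat × String)) (i : Nat) => (([3, 4, 5, 6, 7] : List Nat)).foldl
        (fun (b : Option (Nat × String)) (L : Nat) => pvBetter b (pvLookup (PySem.List.slice cs (some (i : Int)) (some ((i : Int) + (L : Int)))))) b) none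
    = (pvPairs cs.length).foldl (fun b p => pvBetter b (pvHit cs p)) none := by
  unfold pvPairs
  rw [pv_foldl_flatMap]
  simp only [List.foldl_map]
  rfl

lemma pvBetter_eq_none {acc hit : Option (Nat × String)} (h : pvBetter acc hit = none) :
    acc = none ∧ hit = none := by
  rcases hit with - | x
  · simp only [pvBetter] at h
    exact ⟨h, rfl⟩
  · rcases acc with - | b
    · simp [pvBetter] at h
    · by_cases hlt : x.1 < b.1 <;> simp [pvBetter, hlt] at h

lemma pvBetter_eq_some {acc hit : Option (Nat × String)} {e : Nat × String}
    (h : pvBetter acc hit = some e) :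
    (acc = some e ∨ hit = some e) ∧ (∀ b, acc = some b → e.1 ≤ b.1) ∧ (∀ x, hit = some x → e.1 ≤ x.1) := by
  rcases hit with - | x
  · simp only [pvBetter] at h
    refine ⟨Or.inl h, ?_, by simp⟩
    intro b hb
    rw [hb] at h
    cases h
    exact Nat.le_refl _
  · rcases acc with - | b
    · simp only [pvBetter] at h
      cases h
      exact ⟨Or.inr rfl, by simp, by intro x' hx'; cases hx'; exact Nat.le_refl _⟩
    · by_cases hlt : x.1 < b.1 <;> simp only [pvBetter, hlt, if_true, if_false] at h <;> cases h
      · exact ⟨Or.inr rfl, by intro b' hb'; cases hb'; omega,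
          by intro x' hx'; cases hx'; exact Nat.le_refl _⟩
      · exact ⟨Or.inl rfl, by intro b' hb'; cases hb'; exact Nat.le_refl _,
          by intro x' hx'; cases hx'; omega⟩

-- the fold result is bounded by any some-accumulator it starts from
lemma pv_fold_le_acc (cs : List Char) (ps : List (Nat × Nat)) :
    ∀ (acc : Option (Nat × String)) (e b : Nat × String),
      ps.foldl (fun b p => pvBetter b (pvHit cs p)) acc = some e → acc = some b → e.1 ≤ b.1 := by
  induction ps with
  | nil =>
    intro acc e b h1 h2
    rw [h2] at h1
    cases h1
    exact Nat.le_refl _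
  | cons q t ih =>
    intro acc e b h1 h2
    subst h2
    have hacc' : ∃ c, pvBetter (some b) (pvHit cs q) = some c ∧ c.1 ≤ b.1 := by
      rcases pvHit cs q with - | x
      · exact ⟨b, rfl, Nat.le_refl _⟩
      · by_cases hlt : x.1 < b.1
        · exact ⟨x, by simp [pvBetter, hlt], by omega⟩
        · exact ⟨b, by simp [pvBetter, hlt], Nat.le_refl _⟩
    obtain ⟨c, hc, hcb⟩ := hacc'
    have := ih _ e c (by rw [List.foldl_cons] at h1; rw [hc] at h1; exact h1) rfl
    omega

lemma pvFold_spec (cs : List Char) (ps : List (Nat × Nat)) :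
    ∀ acc : Option (Nat × String),
    (ps.foldl (fun b p => pvBetter b (pvHit cs p)) acc = none ∧ acc = none ∧ ∀ p ∈ ps, pvHit cs p = none)
    ∨ ∃ e, ps.foldl (fun b p => pvBetter b (pvHit cs p)) acc = some e
        ∧ (acc = some e ∨ ∃ p ∈ ps, pvHit cs p = some e)
        ∧ (∀ p ∈ ps, ∀ x, pvHit cs p = some x → e.1 ≤ x.1) := by
  induction ps with
  | nil =>
    intro acc
    rcases acc with - | b
    · left; simp
    · right; exact ⟨b, by simp, Or.inl rfl, by simp⟩
  | cons q t ih =>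
    intro acc
    rcases ih (pvBetter acc (pvHit cs q)) with ⟨h1, h2, h3⟩ | ⟨e, h1, h2, h3⟩
    · obtain ⟨ha, hq⟩ := pvBetter_eq_none h2
      left
      refine ⟨by simpa using h1, ha, ?_⟩
      intro p hp
      rcases List.mem_cons.mp hp with rfl | hp
      · exact hq
      · exact h3 p hp
    · right
      refine ⟨e, by simpa using h1, ?_, ?_⟩
      · rcases h2 with h2 | ⟨p, hp, hh⟩
        · obtain ⟨hm, -, -⟩ := pvBetter_eq_some h2
          rcases hm with hm | hm
          · exact Or.inl hm
          · exact Or.inr ⟨q, by simp, hm⟩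
        · exact Or.inr ⟨p, List.mem_cons_of_mem _ hp, hh⟩
      · intro p hp x hx
        rcases List.mem_cons.mp hp with rfl | hp
        · -- e is the result of folding t from the accumulator that already absorbed x
          have hc : ∃ c, pvBetter acc (pvHit cs p) = some c ∧ c.1 ≤ x.1 := by
            rw [hx]
            rcases acc with - | b
            · exact ⟨x, rfl, Nat.le_refl _⟩
            · by_cases hlt : x.1 < b.1
              · exact ⟨x, by simp [pvBetter, hlt], Nat.le_refl _⟩
              · exact ⟨b, by simp [pvBetter, hlt], by omega⟩
          obtain ⟨c, hc1, hc2⟩ := hc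
          have := pv_fold_le_acc cs t _ e c (by rw [hc1] at h1; exact h1) rfl
          omega
        · exact h3 p hp x hx

lemma pv_find_key {k : List Char} {e : Nat × String} (hm : (k, e) ∈ pvKw) :
    List.find? (fun en => en.1 == k) pvKw = some (k, e) := by
  have hnd : (pvKw.map Prod.fst).Nodup := by decide
  revert hm hnd
  generalize pvKw = l
  induction l with
  | nil => intro h _; cases h
  | cons a t ih =>
    intro hm hnd
    simp only [List.map_cons, List.nodup_cons] at hnd
    rcases List.mem_cons.mp hm with rfl | hm
    · simp [List.find?]
    · have hk_in : k ∈ t.map Prod.fst := List.mem_map.mpr ⟨(k, e), hm, rfl⟩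
      have hka : (a.1 == k) = false := by
        refine beq_eq_false_iff_ne.mpr ?_
        intro hq
        exact hnd.1 (hq ▸ hk_in)
      simp only [List.find?, hka]
      exact ih hm hnd.2

lemma pvHit_isIn {cs : List Char} {p : Nat × Nat} {e : Nat × String} (h : pvHit cs p = some e) :
    ∃ k, (k, e) ∈ pvKw ∧ PySem.Chars.isIn k cs = true := by
  unfold pvHit pvLookup at h
  rcases hf : List.find? (fun en => en.1 == PySem.List.slice cs (some (p.1 : Int)) (some ((p.1 : Int) + (p.2 : Int)))) pvKw with - | en
  · rw [hf] at h; simp at h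
  · rw [hf] at h
    simp only [Option.map_some, Option.some.injEq] at h
    have hmem := List.mem_of_find?_eq_some hf
    have hkey : en.1 = PySem.List.slice cs (some (p.1 : Int)) (some ((p.1 : Int) + (p.2 : Int))) := by
      simpa using List.find?_some hf
    refine ⟨en.1, by rw [← h]; simpa using hmem, ?_⟩
    rw [hkey]
    have hj : (p.1 : Int) = ((p.1 : Nat) : Int) := rfl
    rw [PySem.List.slice_natCast_add]
    exact (PySem.Chars.exists_prefix_drop_iff_isIn _ _).mp ⟨p.1, List.take_prefix _ _⟩

lemma pvIsIn_hit {cs k : List Char} {e : Nat × String} (hm : (k, e) ∈ pvKw)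
    (hin : PySem.Chars.isIn k cs = true) :
    ∃ p ∈ pvPairs cs.length, pvHit cs p = some e := by
  obtain ⟨j, hj⟩ := (PySem.Chars.exists_prefix_drop_iff_isIn k cs).mpr hin
  have hL : k.length ∈ ([3, 4, 5, 6, 7] : List Nat) := by
    have hall : ∀ ke ∈ pvKw, ke.1.length ∈ ([3, 4, 5, 6, 7] : List Nat) := by decide
    exact hall (k, e) hm
  have hne : k ≠ [] := by
    intro h0
    rw [h0] at hL
    simp at hL
  have hjlt : j < cs.length := by
    rcases Nat.lt_or_ge j cs.length with hlt | hge
    · exact hlt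
    · rw [List.drop_eq_nil_iff.mpr hge] at hj
      exact absurd (List.prefix_nil.mp hj) hne
  refine ⟨(j, k.length), ?_, ?_⟩
  · unfold pvPairs
    simp only [List.mem_flatMap, List.mem_map, List.mem_range]
    exact ⟨j, hjlt, k.length, hL, rfl⟩
  · simp only [pvHit, pvLookup]
    have hw : PySem.List.slice cs (some ((j : Nat) : Int)) (some (((j : Nat) : Int) + ((k.length : Nat) : Int))) = k := by
      rw [PySem.List.slice_natCast_add]
      exact (List.prefix_iff_eq_take.mp hj).symm
    rw [hw, pv_find_key hm]
    rfl

-- A's port equals the chain over the normalized char list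
lemma pvA_eq_chain (g : String) : traduzir_grupo g = pvChain (pvNormalizar g).toList := by
  simp only [traduzir_grupo, pvChain, PySem.Str.isIn_eq, Bool.or_eq_true]


-- B's port in fold-over-pairs form
lemma pvB_eq (g : String) :
    traduzir_grupo_alt g =
      (match (pvPairs (pvNormalizar g).toList.length).foldl
          (fun b p => pvBetter b (pvHit (pvNormalizar g).toList p)) none with
       | none => "VARIEDADES"
       | some b => b.2) := by
  simp only [traduzir_grupo_alt]
  rw [pv_nested_eq]

lemma pv_core (cs : List Char) :
    pvChain cs =
      (match (pvPairs cs.length).foldl (fun b p => pvBetter b (pvHit cs p)) none with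
       | none => "VARIEDADES"
       | some b => b.2) := by
  rcases pvFold_spec cs (pvPairs cs.length) none with ⟨h1, -, hall⟩ | ⟨e, h1, h2, hmin⟩
  · rw [h1]
    have hallF : ∀ (k : List Char) (ee : Nat × String), (k, ee) ∈ pvKw → PySem.Chars.isIn k cs = false := by
      intro k ee hm
      cases hI : PySem.Chars.isIn k cs
      · rfl
      · exfalso
        obtain ⟨p, hp, hh⟩ := pvIsIn_hit hm hI
        rw [hall p hp] at hh
        simp at hh
    have f0 : PySem.Chars.isIn "ANIME".toList cs = false := hallF "ANIME".toList (0, "ANIME & TOKUSATSU") (by decide)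
    have f1 : PySem.Chars.isIn "NEWS".toList cs = false := hallF "NEWS".toList (1, "NOTÍCIAS") (by decide)
    have f2 : PySem.Chars.isIn "NOTIC".toList cs = false := hallF "NOTIC".toList (1, "NOTÍCIAS") (by decide)
    have f3 : PySem.Chars.isIn "ACTUAL".toList cs = false := hallF "ACTUAL".toList (1, "NOTÍCIAS") (by decide)
    have f4 : PySem.Chars.isIn "SPORT".toList cs = false := hallF "SPORT".toList (2, "ESPORTES") (by decide)
    have f5 : PySem.Chars.isIn "FUTB".toList cs = false := hallF "FUTB".toList (2, "ESPORTES") (by decide)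
    have f6 : PySem.Chars.isIn "BALL".toList cs = false := hallF "BALL".toList (2, "ESPORTES") (by decide)
    have f7 : PySem.Chars.isIn "KID".toList cs = false := hallF "KID".toList (3, "INFANTIL") (by decide)
    have f8 : PySem.Chars.isIn "NIÑ".toList cs = false := hallF "NIÑ".toList (3, "INFANTIL") (by decide)
    have f9 : PySem.Chars.isIn "SERIE".toList cs = false := hallF "SERIE".toList (4, "SÉRIES") (by decide)
    have f10 : PySem.Chars.isIn "DRAMA".toList cs = false := hallF "DRAMA".toList (4, "SÉRIES") (by decide)
    have f11 : PySem.Chars.isIn "REALITY".toList cs = false := hallF "REALITY".toList (4, "SÉRIES") (by decide)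
    have f12 : PySem.Chars.isIn "MOVIE".toList cs = false := hallF "MOVIE".toList (5, "FILMES") (by decide)
    have f13 : PySem.Chars.isIn "FILM".toList cs = false := hallF "FILM".toList (5, "FILMES") (by decide)
    have f14 : PySem.Chars.isIn "SCI".toList cs = false := hallF "SCI".toList (5, "FILMES") (by decide)
    have f15 : PySem.Chars.isIn "DOCU".toList cs = false := hallF "DOCU".toList (6, "DOCUMENTÁRIOS") (by decide)
    have f16 : PySem.Chars.isIn "NATURE".toList cs = false := hallF "NATURE".toList (6, "DOCUMENTÁRIOS") (by decide)
    have f17 : PySem.Chars.isIn "MUSIC".toList cs = false := hallF "MUSIC".toList (7, "MÚSICA") (by decide)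
    have f18 : PySem.Chars.isIn "MUSIK".toList cs = false := hallF "MUSIK".toList (7, "MÚSICA") (by decide)
    clear hallF hall h1
    simp_all [pvChain]
  · rw [h1]
    rcases h2 with h2 | ⟨p, hp, hh⟩
    · exact absurd h2 (by simp)
    obtain ⟨k, hk, hin⟩ := pvHit_isIn hh
    have hlow : ∀ (k' : List Char) (e' : Nat × String), (k', e') ∈ pvKw → e'.1 < e.1 → PySem.Chars.isIn k' cs = false := by
      intro k' e' hm' hlt
      cases hI : PySem.Chars.isIn k' cs
      · rfl
      · exfalso
        obtain ⟨p', hp', hh'⟩ := pvIsIn_hit hm' hI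
        have := hmin p' hp' e' hh'
        omega
    simp only [pvKw, List.mem_cons, List.not_mem_nil, or_false, Prod.mk.injEq] at hk
    rcases hk with ⟨rfl, rfl⟩|⟨rfl, rfl⟩|⟨rfl, rfl⟩|⟨rfl, rfl⟩|⟨rfl, rfl⟩|⟨rfl, rfl⟩|⟨rfl, rfl⟩|⟨rfl, rfl⟩|⟨rfl, rfl⟩|⟨rfl, rfl⟩|⟨rfl, rfl⟩|⟨rfl, rfl⟩|⟨rfl, rfl⟩|⟨rfl, rfl⟩|⟨rfl, rfl⟩|⟨rfl, rfl⟩|⟨rfl, rfl⟩|⟨rfl, rfl⟩|⟨rfl, rfl⟩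
    · -- keyword ANIME
      clear hlow hmin h1 hh hp
      simp_all [pvChain]
    · -- keyword NEWS
      have f0 : PySem.Chars.isIn "ANIME".toList cs = false := hlow "ANIME".toList (0, "ANIME & TOKUSATSU") (by decide) (by decide)
      clear hlow hmin h1 hh hp
      simp_all [pvChain]
    · -- keyword NOTIC
      have f0 : PySem.Chars.isIn "ANIME".toList cs = false := hlow "ANIME".toList (0, "ANIME & TOKUSATSU") (by decide) (by decide)
      clear hlow hmin h1 hh hp
      simp_all [pvChain]
    · -- keyword ACTUAL
      have f0 : PySem.Chars.isIn "ANIME".toList cs = false := hlow "ANIME".toList (0, "ANIME & TOKUSATSU") (by decide) (by decide)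
      clear hlow hmin h1 hh hp
      simp_all [pvChain]
    · -- keyword SPORT
      have f0 : PySem.Chars.isIn "ANIME".toList cs = false := hlow "ANIME".toList (0, "ANIME & TOKUSATSU") (by decide) (by decide)
      have f1 : PySem.Chars.isIn "NEWS".toList cs = false := hlow "NEWS".toList (1, "NOTÍCIAS") (by decide) (by decide)
      have f2 : PySem.Chars.isIn "NOTIC".toList cs = false := hlow "NOTIC".toList (1, "NOTÍCIAS") (by decide) (by decide)
      have f3 : PySem.Chars.isIn "ACTUAL".toList cs = false := hlow "ACTUAL".toList (1, "NOTÍCIAS") (by decide) (by decide)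
      clear hlow hmin h1 hh hp
      simp_all [pvChain]
    · -- keyword FUTB
      have f0 : PySem.Chars.isIn "ANIME".toList cs = false := hlow "ANIME".toList (0, "ANIME & TOKUSATSU") (by decide) (by decide)
      have f1 : PySem.Chars.isIn "NEWS".toList cs = false := hlow "NEWS".toList (1, "NOTÍCIAS") (by decide) (by decide)
      have f2 : PySem.Chars.isIn "NOTIC".toList cs = false := hlow "NOTIC".toList (1, "NOTÍCIAS") (by decide) (by decide)
      have f3 : PySem.Chars.isIn "ACTUAL".toList cs = false := hlow "ACTUAL".toList (1, "NOTÍCIAS") (by decide) (by decide)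
      clear hlow hmin h1 hh hp
      simp_all [pvChain]
    · -- keyword BALL
      have f0 : PySem.Chars.isIn "ANIME".toList cs = false := hlow "ANIME".toList (0, "ANIME & TOKUSATSU") (by decide) (by decide)
      have f1 : PySem.Chars.isIn "NEWS".toList cs = false := hlow "NEWS".toList (1, "NOTÍCIAS") (by decide) (by decide)
      have f2 : PySem.Chars.isIn "NOTIC".toList cs = false := hlow "NOTIC".toList (1, "NOTÍCIAS") (by decide) (by decide)
      have f3 : PySem.Chars.isIn "ACTUAL".toList cs = false := hlow "ACTUAL".toList (1, "NOTÍCIAS") (by decide) (by decide)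
      clear hlow hmin h1 hh hp
      simp_all [pvChain]
    · -- keyword KID
      have f0 : PySem.Chars.isIn "ANIME".toList cs = false := hlow "ANIME".toList (0, "ANIME & TOKUSATSU") (by decide) (by decide)
      have f1 : PySem.Chars.isIn "NEWS".toList cs = false := hlow "NEWS".toList (1, "NOTÍCIAS") (by decide) (by decide)
      have f2 : PySem.Chars.isIn "NOTIC".toList cs = false := hlow "NOTIC".toList (1, "NOTÍCIAS") (by decide) (by decide)
      have f3 : PySem.Chars.isIn "ACTUAL".toList cs = false := hlow "ACTUAL".toList (1, "NOTÍCIAS") (by decide) (by decide)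
      have f4 : PySem.Chars.isIn "SPORT".toList cs = false := hlow "SPORT".toList (2, "ESPORTES") (by decide) (by decide)
      have f5 : PySem.Chars.isIn "FUTB".toList cs = false := hlow "FUTB".toList (2, "ESPORTES") (by decide) (by decide)
      have f6 : PySem.Chars.isIn "BALL".toList cs = false := hlow "BALL".toList (2, "ESPORTES") (by decide) (by decide)
      clear hlow hmin h1 hh hp
      simp_all [pvChain]
    · -- keyword NIÑ
      have f0 : PySem.Chars.isIn "ANIME".toList cs = false := hlow "ANIME".toList (0, "ANIME & TOKUSATSU") (by decide) (by decide)
      have f1 : PySem.Chars.isIn "NEWS".toList cs = false := hlow "NEWS".toList (1, "NOTÍCIAS") (by decide) (by decide)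
      have f2 : PySem.Chars.isIn "NOTIC".toList cs = false := hlow "NOTIC".toList (1, "NOTÍCIAS") (by decide) (by decide)
      have f3 : PySem.Chars.isIn "ACTUAL".toList cs = false := hlow "ACTUAL".toList (1, "NOTÍCIAS") (by decide) (by decide)
      have f4 : PySem.Chars.isIn "SPORT".toList cs = false := hlow "SPORT".toList (2, "ESPORTES") (by decide) (by decide)
      have f5 : PySem.Chars.isIn "FUTB".toList cs = false := hlow "FUTB".toList (2, "ESPORTES") (by decide) (by decide)
      have f6 : PySem.Chars.isIn "BALL".toList cs = false := hlow "BALL".toList (2, "ESPORTES") (by decide) (by decide)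
      clear hlow hmin h1 hh hp
      simp_all [pvChain]
    · -- keyword SERIE
      have f0 : PySem.Chars.isIn "ANIME".toList cs = false := hlow "ANIME".toList (0, "ANIME & TOKUSATSU") (by decide) (by decide)
      have f1 : PySem.Chars.isIn "NEWS".toList cs = false := hlow "NEWS".toList (1, "NOTÍCIAS") (by decide) (by decide)
      have f2 : PySem.Chars.isIn "NOTIC".toList cs = false := hlow "NOTIC".toList (1, "NOTÍCIAS") (by decide) (by decide)
      have f3 : PySem.Chars.isIn "ACTUAL".toList cs = false := hlow "ACTUAL".toList (1, "NOTÍCIAS") (by decide) (by decide)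
      have f4 : PySem.Chars.isIn "SPORT".toList cs = false := hlow "SPORT".toList (2, "ESPORTES") (by decide) (by decide)
      have f5 : PySem.Chars.isIn "FUTB".toList cs = false := hlow "FUTB".toList (2, "ESPORTES") (by decide) (by decide)
      have f6 : PySem.Chars.isIn "BALL".toList cs = false := hlow "BALL".toList (2, "ESPORTES") (by decide) (by decide)
      have f7 : PySem.Chars.isIn "KID".toList cs = false := hlow "KID".toList (3, "INFANTIL") (by decide) (by decide)
      have f8 : PySem.Chars.isIn "NIÑ".toList cs = false := hlow "NIÑ".toList (3, "INFANTIL") (by decide) (by decide)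
      clear hlow hmin h1 hh hp
      simp_all [pvChain]
    · -- keyword DRAMA
      have f0 : PySem.Chars.isIn "ANIME".toList cs = false := hlow "ANIME".toList (0, "ANIME & TOKUSATSU") (by decide) (by decide)
      have f1 : PySem.Chars.isIn "NEWS".toList cs = false := hlow "NEWS".toList (1, "NOTÍCIAS") (by decide) (by decide)
      have f2 : PySem.Chars.isIn "NOTIC".toList cs = false := hlow "NOTIC".toList (1, "NOTÍCIAS") (by decide) (by decide)
      have f3 : PySem.Chars.isIn "ACTUAL".toList cs = false := hlow "ACTUAL".toList (1, "NOTÍCIAS") (by decide) (by decide)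
      have f4 : PySem.Chars.isIn "SPORT".toList cs = false := hlow "SPORT".toList (2, "ESPORTES") (by decide) (by decide)
      have f5 : PySem.Chars.isIn "FUTB".toList cs = false := hlow "FUTB".toList (2, "ESPORTES") (by decide) (by decide)
      have f6 : PySem.Chars.isIn "BALL".toList cs = false := hlow "BALL".toList (2, "ESPORTES") (by decide) (by decide)
      have f7 : PySem.Chars.isIn "KID".toList cs = false := hlow "KID".toList (3, "INFANTIL") (by decide) (by decide)
      have f8 : PySem.Chars.isIn "NIÑ".toList cs = false := hlow "NIÑ".toList (3, "INFANTIL") (by decide) (by decide)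
      clear hlow hmin h1 hh hp
      simp_all [pvChain]
    · -- keyword REALITY
      have f0 : PySem.Chars.isIn "ANIME".toList cs = false := hlow "ANIME".toList (0, "ANIME & TOKUSATSU") (by decide) (by decide)
      have f1 : PySem.Chars.isIn "NEWS".toList cs = false := hlow "NEWS".toList (1, "NOTÍCIAS") (by decide) (by decide)
      have f2 : PySem.Chars.isIn "NOTIC".toList cs = false := hlow "NOTIC".toList (1, "NOTÍCIAS") (by decide) (by decide)
      have f3 : PySem.Chars.isIn "ACTUAL".toList cs = false := hlow "ACTUAL".toList (1, "NOTÍCIAS") (by decide) (by decide)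
      have f4 : PySem.Chars.isIn "SPORT".toList cs = false := hlow "SPORT".toList (2, "ESPORTES") (by decide) (by decide)
      have f5 : PySem.Chars.isIn "FUTB".toList cs = false := hlow "FUTB".toList (2, "ESPORTES") (by decide) (by decide)
      have f6 : PySem.Chars.isIn "BALL".toList cs = false := hlow "BALL".toList (2, "ESPORTES") (by decide) (by decide)
      have f7 : PySem.Chars.isIn "KID".toList cs = false := hlow "KID".toList (3, "INFANTIL") (by decide) (by decide)
      have f8 : PySem.Chars.isIn "NIÑ".toList cs = false := hlow "NIÑ".toList (3, "INFANTIL") (by decide) (by decide)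
      clear hlow hmin h1 hh hp
      simp_all [pvChain]
    · -- keyword MOVIE
      have f0 : PySem.Chars.isIn "ANIME".toList cs = false := hlow "ANIME".toList (0, "ANIME & TOKUSATSU") (by decide) (by decide)
      have f1 : PySem.Chars.isIn "NEWS".toList cs = false := hlow "NEWS".toList (1, "NOTÍCIAS") (by decide) (by decide)
      have f2 : PySem.Chars.isIn "NOTIC".toList cs = false := hlow "NOTIC".toList (1, "NOTÍCIAS") (by decide) (by decide)
      have f3 : PySem.Chars.isIn "ACTUAL".toList cs = false := hlow "ACTUAL".toList (1, "NOTÍCIAS") (by decide) (by decide)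
      have f4 : PySem.Chars.isIn "SPORT".toList cs = false := hlow "SPORT".toList (2, "ESPORTES") (by decide) (by decide)
      have f5 : PySem.Chars.isIn "FUTB".toList cs = false := hlow "FUTB".toList (2, "ESPORTES") (by decide) (by decide)
      have f6 : PySem.Chars.isIn "BALL".toList cs = false := hlow "BALL".toList (2, "ESPORTES") (by decide) (by decide)
      have f7 : PySem.Chars.isIn "KID".toList cs = false := hlow "KID".toList (3, "INFANTIL") (by decide) (by decide)
      have f8 : PySem.Chars.isIn "NIÑ".toList cs = false := hlow "NIÑ".toList (3, "INFANTIL") (by decide) (by decide)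
      have f9 : PySem.Chars.isIn "SERIE".toList cs = false := hlow "SERIE".toList (4, "SÉRIES") (by decide) (by decide)
      have f10 : PySem.Chars.isIn "DRAMA".toList cs = false := hlow "DRAMA".toList (4, "SÉRIES") (by decide) (by decide)
      have f11 : PySem.Chars.isIn "REALITY".toList cs = false := hlow "REALITY".toList (4, "SÉRIES") (by decide) (by decide)
      clear hlow hmin h1 hh hp
      simp_all [pvChain]
    · -- keyword FILM
      have f0 : PySem.Chars.isIn "ANIME".toList cs = false := hlow "ANIME".toList (0, "ANIME & TOKUSATSU") (by decide) (by decide)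
      have f1 : PySem.Chars.isIn "NEWS".toList cs = false := hlow "NEWS".toList (1, "NOTÍCIAS") (by decide) (by decide)
      have f2 : PySem.Chars.isIn "NOTIC".toList cs = false := hlow "NOTIC".toList (1, "NOTÍCIAS") (by decide) (by decide)
      have f3 : PySem.Chars.isIn "ACTUAL".toList cs = false := hlow "ACTUAL".toList (1, "NOTÍCIAS") (by decide) (by decide)
      have f4 : PySem.Chars.isIn "SPORT".toList cs = false := hlow "SPORT".toList (2, "ESPORTES") (by decide) (by decide)
      have f5 : PySem.Chars.isIn "FUTB".toList cs = false := hlow "FUTB".toList (2, "ESPORTES") (by decide) (by decide)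
      have f6 : PySem.Chars.isIn "BALL".toList cs = false := hlow "BALL".toList (2, "ESPORTES") (by decide) (by decide)
      have f7 : PySem.Chars.isIn "KID".toList cs = false := hlow "KID".toList (3, "INFANTIL") (by decide) (by decide)
      have f8 : PySem.Chars.isIn "NIÑ".toList cs = false := hlow "NIÑ".toList (3, "INFANTIL") (by decide) (by decide)
      have f9 : PySem.Chars.isIn "SERIE".toList cs = false := hlow "SERIE".toList (4, "SÉRIES") (by decide) (by decide)
      have f10 : PySem.Chars.isIn "DRAMA".toList cs = false := hlow "DRAMA".toList (4, "SÉRIES") (by decide) (by decide)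
      have f11 : PySem.Chars.isIn "REALITY".toList cs = false := hlow "REALITY".toList (4, "SÉRIES") (by decide) (by decide)
      clear hlow hmin h1 hh hp
      simp_all [pvChain]
    · -- keyword SCI
      have f0 : PySem.Chars.isIn "ANIME".toList cs = false := hlow "ANIME".toList (0, "ANIME & TOKUSATSU") (by decide) (by decide)
      have f1 : PySem.Chars.isIn "NEWS".toList cs = false := hlow "NEWS".toList (1, "NOTÍCIAS") (by decide) (by decide)
      have f2 : PySem.Chars.isIn "NOTIC".toList cs = false := hlow "NOTIC".toList (1, "NOTÍCIAS") (by decide) (by decide)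
      have f3 : PySem.Chars.isIn "ACTUAL".toList cs = false := hlow "ACTUAL".toList (1, "NOTÍCIAS") (by decide) (by decide)
      have f4 : PySem.Chars.isIn "SPORT".toList cs = false := hlow "SPORT".toList (2, "ESPORTES") (by decide) (by decide)
      have f5 : PySem.Chars.isIn "FUTB".toList cs = false := hlow "FUTB".toList (2, "ESPORTES") (by decide) (by decide)
      have f6 : PySem.Chars.isIn "BALL".toList cs = false := hlow "BALL".toList (2, "ESPORTES") (by decide) (by decide)
      have f7 : PySem.Chars.isIn "KID".toList cs = false := hlow "KID".toList (3, "INFANTIL") (by decide) (by decide)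
      have f8 : PySem.Chars.isIn "NIÑ".toList cs = false := hlow "NIÑ".toList (3, "INFANTIL") (by decide) (by decide)
      have f9 : PySem.Chars.isIn "SERIE".toList cs = false := hlow "SERIE".toList (4, "SÉRIES") (by decide) (by decide)
      have f10 : PySem.Chars.isIn "DRAMA".toList cs = false := hlow "DRAMA".toList (4, "SÉRIES") (by decide) (by decide)
      have f11 : PySem.Chars.isIn "REALITY".toList cs = false := hlow "REALITY".toList (4, "SÉRIES") (by decide) (by decide)
      clear hlow hmin h1 hh hp
      simp_all [pvChain]
    · -- keyword DOCU
      have f0 : PySem.Chars.isIn "ANIME".toList cs = false := hlow "ANIME".toList (0, "ANIME & TOKUSATSU") (by decide) (by decide)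
      have f1 : PySem.Chars.isIn "NEWS".toList cs = false := hlow "NEWS".toList (1, "NOTÍCIAS") (by decide) (by decide)
      have f2 : PySem.Chars.isIn "NOTIC".toList cs = false := hlow "NOTIC".toList (1, "NOTÍCIAS") (by decide) (by decide)
      have f3 : PySem.Chars.isIn "ACTUAL".toList cs = false := hlow "ACTUAL".toList (1, "NOTÍCIAS") (by decide) (by decide)
      have f4 : PySem.Chars.isIn "SPORT".toList cs = false := hlow "SPORT".toList (2, "ESPORTES") (by decide) (by decide)
      have f5 : PySem.Chars.isIn "FUTB".toList cs = false := hlow "FUTB".toList (2, "ESPORTES") (by decide) (by decide)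
      have f6 : PySem.Chars.isIn "BALL".toList cs = false := hlow "BALL".toList (2, "ESPORTES") (by decide) (by decide)
      have f7 : PySem.Chars.isIn "KID".toList cs = false := hlow "KID".toList (3, "INFANTIL") (by decide) (by decide)
      have f8 : PySem.Chars.isIn "NIÑ".toList cs = false := hlow "NIÑ".toList (3, "INFANTIL") (by decide) (by decide)
      have f9 : PySem.Chars.isIn "SERIE".toList cs = false := hlow "SERIE".toList (4, "SÉRIES") (by decide) (by decide)
      have f10 : PySem.Chars.isIn "DRAMA".toList cs = false := hlow "DRAMA".toList (4, "SÉRIES") (by decide) (by decide)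
      have f11 : PySem.Chars.isIn "REALITY".toList cs = false := hlow "REALITY".toList (4, "SÉRIES") (by decide) (by decide)
      have f12 : PySem.Chars.isIn "MOVIE".toList cs = false := hlow "MOVIE".toList (5, "FILMES") (by decide) (by decide)
      have f13 : PySem.Chars.isIn "FILM".toList cs = false := hlow "FILM".toList (5, "FILMES") (by decide) (by decide)
      have f14 : PySem.Chars.isIn "SCI".toList cs = false := hlow "SCI".toList (5, "FILMES") (by decide) (by decide)
      clear hlow hmin h1 hh hp
      simp_all [pvChain]
    · -- keyword NATURE
      have f0 : PySem.Chars.isIn "ANIME".toList cs = false := hlow "ANIME".toList (0, "ANIME & TOKUSATSU") (by decide) (by decide)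
      have f1 : PySem.Chars.isIn "NEWS".toList cs = false := hlow "NEWS".toList (1, "NOTÍCIAS") (by decide) (by decide)
      have f2 : PySem.Chars.isIn "NOTIC".toList cs = false := hlow "NOTIC".toList (1, "NOTÍCIAS") (by decide) (by decide)
      have f3 : PySem.Chars.isIn "ACTUAL".toList cs = false := hlow "ACTUAL".toList (1, "NOTÍCIAS") (by decide) (by decide)
      have f4 : PySem.Chars.isIn "SPORT".toList cs = false := hlow "SPORT".toList (2, "ESPORTES") (by decide) (by decide)
      have f5 : PySem.Chars.isIn "FUTB".toList cs = false := hlow "FUTB".toList (2, "ESPORTES") (by decide) (by decide)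
      have f6 : PySem.Chars.isIn "BALL".toList cs = false := hlow "BALL".toList (2, "ESPORTES") (by decide) (by decide)
      have f7 : PySem.Chars.isIn "KID".toList cs = false := hlow "KID".toList (3, "INFANTIL") (by decide) (by decide)
      have f8 : PySem.Chars.isIn "NIÑ".toList cs = false := hlow "NIÑ".toList (3, "INFANTIL") (by decide) (by decide)
      have f9 : PySem.Chars.isIn "SERIE".toList cs = false := hlow "SERIE".toList (4, "SÉRIES") (by decide) (by decide)
      have f10 : PySem.Chars.isIn "DRAMA".toList cs = false := hlow "DRAMA".toList (4, "SÉRIES") (by decide) (by decide)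
      have f11 : PySem.Chars.isIn "REALITY".toList cs = false := hlow "REALITY".toList (4, "SÉRIES") (by decide) (by decide)
      have f12 : PySem.Chars.isIn "MOVIE".toList cs = false := hlow "MOVIE".toList (5, "FILMES") (by decide) (by decide)
      have f13 : PySem.Chars.isIn "FILM".toList cs = false := hlow "FILM".toList (5, "FILMES") (by decide) (by decide)
      have f14 : PySem.Chars.isIn "SCI".toList cs = false := hlow "SCI".toList (5, "FILMES") (by decide) (by decide)
      clear hlow hmin h1 hh hp
      simp_all [pvChain]
    · -- keyword MUSIC
      have f0 : PySem.Chars.isIn "ANIME".toList cs = false := hlow "ANIME".toList (0, "ANIME & TOKUSATSU") (by decide) (by decide)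
      have f1 : PySem.Chars.isIn "NEWS".toList cs = false := hlow "NEWS".toList (1, "NOTÍCIAS") (by decide) (by decide)
      have f2 : PySem.Chars.isIn "NOTIC".toList cs = false := hlow "NOTIC".toList (1, "NOTÍCIAS") (by decide) (by decide)
      have f3 : PySem.Chars.isIn "ACTUAL".toList cs = false := hlow "ACTUAL".toList (1, "NOTÍCIAS") (by decide) (by decide)
      have f4 : PySem.Chars.isIn "SPORT".toList cs = false := hlow "SPORT".toList (2, "ESPORTES") (by decide) (by decide)
      have f5 : PySem.Chars.isIn "FUTB".toList cs = false := hlow "FUTB".toList (2, "ESPORTES") (by decide) (by decide)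
      have f6 : PySem.Chars.isIn "BALL".toList cs = false := hlow "BALL".toList (2, "ESPORTES") (by decide) (by decide)
      have f7 : PySem.Chars.isIn "KID".toList cs = false := hlow "KID".toList (3, "INFANTIL") (by decide) (by decide)
      have f8 : PySem.Chars.isIn "NIÑ".toList cs = false := hlow "NIÑ".toList (3, "INFANTIL") (by decide) (by decide)
      have f9 : PySem.Chars.isIn "SERIE".toList cs = false := hlow "SERIE".toList (4, "SÉRIES") (by decide) (by decide)
      have f10 : PySem.Chars.isIn "DRAMA".toList cs = false := hlow "DRAMA".toList (4, "SÉRIES") (by decide) (by decide)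
      have f11 : PySem.Chars.isIn "REALITY".toList cs = false := hlow "REALITY".toList (4, "SÉRIES") (by decide) (by decide)
      have f12 : PySem.Chars.isIn "MOVIE".toList cs = false := hlow "MOVIE".toList (5, "FILMES") (by decide) (by decide)
      have f13 : PySem.Chars.isIn "FILM".toList cs = false := hlow "FILM".toList (5, "FILMES") (by decide) (by decide)
      have f14 : PySem.Chars.isIn "SCI".toList cs = false := hlow "SCI".toList (5, "FILMES") (by decide) (by decide)
      have f15 : PySem.Chars.isIn "DOCU".toList cs = false := hlow "DOCU".toList (6, "DOCUMENTÁRIOS") (by decide) (by decide)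
      have f16 : PySem.Chars.isIn "NATURE".toList cs = false := hlow "NATURE".toList (6, "DOCUMENTÁRIOS") (by decide) (by decide)
      clear hlow hmin h1 hh hp
      simp_all [pvChain]
    · -- keyword MUSIK
      have f0 : PySem.Chars.isIn "ANIME".toList cs = false := hlow "ANIME".toList (0, "ANIME & TOKUSATSU") (by decide) (by decide)
      have f1 : PySem.Chars.isIn "NEWS".toList cs = false := hlow "NEWS".toList (1, "NOTÍCIAS") (by decide) (by decide)
      have f2 : PySem.Chars.isIn "NOTIC".toList cs = false := hlow "NOTIC".toList (1, "NOTÍCIAS") (by decide) (by decide)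
      have f3 : PySem.Chars.isIn "ACTUAL".toList cs = false := hlow "ACTUAL".toList (1, "NOTÍCIAS") (by decide) (by decide)
      have f4 : PySem.Chars.isIn "SPORT".toList cs = false := hlow "SPORT".toList (2, "ESPORTES") (by decide) (by decide)
      have f5 : PySem.Chars.isIn "FUTB".toList cs = false := hlow "FUTB".toList (2, "ESPORTES") (by decide) (by decide)
      have f6 : PySem.Chars.isIn "BALL".toList cs = false := hlow "BALL".toList (2, "ESPORTES") (by decide) (by decide)
      have f7 : PySem.Chars.isIn "KID".toList cs = false := hlow "KID".toList (3, "INFANTIL") (by decide) (by decide)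
      have f8 : PySem.Chars.isIn "NIÑ".toList cs = false := hlow "NIÑ".toList (3, "INFANTIL") (by decide) (by decide)
      have f9 : PySem.Chars.isIn "SERIE".toList cs = false := hlow "SERIE".toList (4, "SÉRIES") (by decide) (by decide)
      have f10 : PySem.Chars.isIn "DRAMA".toList cs = false := hlow "DRAMA".toList (4, "SÉRIES") (by decide) (by decide)
      have f11 : PySem.Chars.isIn "REALITY".toList cs = false := hlow "REALITY".toList (4, "SÉRIES") (by decide) (by decide)
      have f12 : PySem.Chars.isIn "MOVIE".toList cs = false := hlow "MOVIE".toList (5, "FILMES") (by decide) (by decide)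
      have f13 : PySem.Chars.isIn "FILM".toList cs = false := hlow "FILM".toList (5, "FILMES") (by decide) (by decide)
      have f14 : PySem.Chars.isIn "SCI".toList cs = false := hlow "SCI".toList (5, "FILMES") (by decide) (by decide)
      have f15 : PySem.Chars.isIn "DOCU".toList cs = false := hlow "DOCU".toList (6, "DOCUMENTÁRIOS") (by decide) (by decide)
      have f16 : PySem.Chars.isIn "NATURE".toList cs = false := hlow "NATURE".toList (6, "DOCUMENTÁRIOS") (by decide) (by decide)
      clear hlow hmin h1 hh hp
      simp_all [pvChain]

-- ===== VERDICT (by name: the statement is the Claim_ definition above) =====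
theorem traduzir_grupo_spec : Claim_equal_traduzir_grupo := by
  intro g _
  unfold Spec_traduzir_grupo
  rw [pvA_eq_chain g, pvB_eq g]
  exact pv_core (pvNormalizar g).toList
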